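-- pv_equiv track=rewrite | github.com/sharon1003/CodePractice | 20_Stack-EqualStack/sstack.py | equalStacks
-- ===== SOURCE A (Python) =====
-- def equalStacks(h1, h2, h3):
--     # Write your code here
--     s1, s2, s3 = sum(h1), sum(h2), sum(h3)
--     i, j, k = 0, 0, 0
--     while True:
--         if i == len(h1) or j == len(h2) or k == len(h3):
--             return 0
--
--         if s1 == s2 and s2 == s3:
--             return s1
--
--         if s1 >= s2 and s1 >= s3:
--             s1 -= h1[i]
--             i += 1
--         elif s2 >= s1 and s2 >= s3:
--             s2 -= h2[j]
--             j += 1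
--         else:
--             s3 -= h3[k]
--             k += 1
-- ===== SOURCE B (Python) =====
-- def equalStacks(h1, h2, h3):
--     # Generalized n-stack formulation over ONE list of stacks: reverse each stack so
--     # its top is the list end, keep the list of sums, and repeatedly pop() from the
--     # first stack of maximal sum (sums.index(max(sums))) until all sums agree
--     # (min == max) or some stack is drained.
--     sts = [h1[::-1], h2[::-1], h3[::-1]]
--     sums = [sum(s) for s in sts]
--     while all(sts):
--         if min(sums) == max(sums):
--             return sums[0]
--         t = sums.index(max(sums))
--         sums[t] -= sts[t].pop()
--     return 0
-- ===== Notes on version B (the rewrite author's own statement) =====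
-- stated objective: alternative
-- what changed: B generalises the reduction to n stacks over a single list-of-stacks state: each stack is reversed so pop() takes its top, the sums live in one list, equality is tested with min==max and the stack to pop is chosen by sums.index(max(sums)), instead of A's flat while-loop over three named running sums with three index pointers and a three-way branch chain; on signed inputs the greedy pop order fully determines the result, so any exact re-implementation must follow it and B is a different decomposition rather than a different algorithm.
import Mathlib
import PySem

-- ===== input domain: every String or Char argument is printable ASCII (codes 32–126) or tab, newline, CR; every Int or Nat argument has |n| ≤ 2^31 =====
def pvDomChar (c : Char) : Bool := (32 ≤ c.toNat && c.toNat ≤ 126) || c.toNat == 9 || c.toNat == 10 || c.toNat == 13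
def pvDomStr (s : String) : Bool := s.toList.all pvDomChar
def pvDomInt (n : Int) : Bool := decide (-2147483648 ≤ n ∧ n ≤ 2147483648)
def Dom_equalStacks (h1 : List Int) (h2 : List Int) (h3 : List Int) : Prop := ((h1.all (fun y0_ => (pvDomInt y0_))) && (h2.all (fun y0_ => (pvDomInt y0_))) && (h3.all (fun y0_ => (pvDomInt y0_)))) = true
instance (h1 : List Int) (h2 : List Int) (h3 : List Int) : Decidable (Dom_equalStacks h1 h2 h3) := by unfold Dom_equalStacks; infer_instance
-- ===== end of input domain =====

-- B recasts the reduction as a generalized n-stack procedure on one list of stacks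
-- (tops at the list ends, sums kept as a list, stack chosen by index-of-max), instead
-- of A's flat loop over three named running sums and three index pointers.

-- ===== PORT A =====
-- A's while-True loop: indices i/j/k are represented by the remaining suffixes; the
-- running sums s1/s2/s3 are carried exactly as in the Python.
def eqLoop : List Int → List Int → List Int → Int → Int → Int → Int
  | [], _, _, _, _, _ => 0
  | _ :: _, [], _, _, _, _ => 0
  | _ :: _, _ :: _, [], _, _, _ => 0
  | a :: r1, b :: r2, c :: r3, s1, s2, s3 =>
    if s1 = s2 ∧ s2 = s3 then s1
    else if s1 ≥ s2 ∧ s1 ≥ s3 then eqLoop r1 (b :: r2) (c :: r3) (s1 - a) s2 s3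
    else if s2 ≥ s1 ∧ s2 ≥ s3 then eqLoop (a :: r1) r2 (c :: r3) s1 (s2 - b) s3
    else eqLoop (a :: r1) (b :: r2) r3 s1 s2 (s3 - c)
termination_by r1 r2 r3 _ _ _ => r1.length + r2.length + r3.length

def equalStacks (h1 : List Int) (h2 : List Int) (h3 : List Int) : Int :=
  eqLoop h1 h2 h3 h1.sum h2.sum h3.sum

-- ===== PORT B =====
-- B's while loop over ONE list of stacks: each stack reversed (top = list end, pop() =
-- getLastD/dropLast), the list of sums kept alongside, the stack to pop chosen by
-- sums.index(max(sums)); fuel only makes the loop total (each round strictly shrinks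
-- the total length, so it is never exhausted).
def bLoop : Nat → List (List Int) → List Int → Int
  | 0, _, _ => 0
  | fuel + 1, sts, sums =>
    if sts.all (fun s => !s.isEmpty) then
      match PySem.List.min? sums (fun y => y), PySem.List.max? sums (fun y => y) with
      | some mn, some mx =>
        if mn = mx then sums.headD 0   -- sums[0]; sums is nonempty here, so headD is exact
        else
          match PySem.List.index? sums mx with
          | some t =>
            bLoop fuel (sts.set t ((sts.getD t []).dropLast))
              (sums.set t (sums.getD t 0 - (sts.getD t []).getLastD 0))
          | none => 0                  -- unreachable: mx ∈ sums
      | _, _ => 0                      -- unreachable: sums is nonempty here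
    else 0

def equalStacks_alt (h1 : List Int) (h2 : List Int) (h3 : List Int) : Int :=
  bLoop (h1.length + h2.length + h3.length + 1) [h1.reverse, h2.reverse, h3.reverse]
    [h1.reverse.sum, h2.reverse.sum, h3.reverse.sum]

-- ===== PRECONDITION & SPEC =====
def Spec_equalStacks (h1 : List Int) (h2 : List Int) (h3 : List Int) (out : Int) : Prop := out = equalStacks_alt h1 h2 h3
instance (h1 : List Int) (h2 : List Int) (h3 : List Int) (out : Int) : Decidable (Spec_equalStacks h1 h2 h3 out) := by unfold Spec_equalStacks; infer_instance

-- ===== CLAIM (what is proved, stated in full; the proofs are below) =====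
def Claim_equal_equalStacks : Prop := ∀ (h1 : List Int) (h2 : List Int) (h3 : List Int), Dom_equalStacks h1 h2 h3 → Spec_equalStacks h1 h2 h3 (equalStacks h1 h2 h3)

-- ===== LEMMAS AND PROOFS =====

theorem bLoop_eq (fuel : Nat) : ∀ (l1 l2 l3 : List Int),
    l1.length + l2.length + l3.length < fuel →
    bLoop fuel [l1.reverse, l2.reverse, l3.reverse] [l1.sum, l2.sum, l3.sum]
      = eqLoop l1 l2 l3 l1.sum l2.sum l3.sum := by
  induction fuel with
  | zero => intro l1 l2 l3 h; omega
  | succ fuel ih =>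
    intro l1 l2 l3 hlen
    match l1, l2, l3 with
    | [], _, _ => simp [bLoop, eqLoop]
    | _ :: _, [], _ => simp [bLoop, eqLoop]
    | _ :: _, _ :: _, [] => simp [bLoop, eqLoop]
    | a :: r1, b :: r2, c :: r3 =>
      simp only [List.length_cons] at hlen
      rw [bLoop, eqLoop, if_pos (by simp)]
      rw [PySem.List.min?_id_cons, PySem.List.max?_id_cons]
      simp only [List.foldl_cons, List.foldl_nil]
      have hs1 : (a :: r1).sum = a + r1.sum := by simp
      have hs2 : (b :: r2).sum = b + r2.sum := by simp
      have hs3 : (c :: r3).sum = c + r3.sum := by simp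
      by_cases heq : (a :: r1).sum = (b :: r2).sum ∧ (b :: r2).sum = (c :: r3).sum
      · rw [if_pos heq, if_pos (by omega)]
        simp [heq.1, heq.2]
      · rw [if_neg heq, if_neg (by omega)]
        by_cases h1m : (a :: r1).sum ≥ (b :: r2).sum ∧ (a :: r1).sum ≥ (c :: r3).sum
        · have hmx : max (max (a :: r1).sum (b :: r2).sum) (c :: r3).sum = (a :: r1).sum := by
            omega
          rw [if_pos h1m, hmx, PySem.List.index?_cons_self]
          have hpop : (a :: r1).reverse.dropLast = r1.reverse := by
            rw [List.reverse_cons, List.dropLast_concat]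
          have hlast : (a :: r1).reverse.getLastD 0 = a := by
            rw [List.reverse_cons, List.getLastD_concat]
          have ha : (a :: r1).sum - a = r1.sum := by omega
          simp only [List.set_cons_zero, List.getD_cons_zero, hpop, hlast, ha]
          exact ih r1 (b :: r2) (c :: r3) (by simp; omega)
        · rw [if_neg h1m]
          by_cases h2m : (b :: r2).sum ≥ (a :: r1).sum ∧ (b :: r2).sum ≥ (c :: r3).sum
          · have hmx : max (max (a :: r1).sum (b :: r2).sum) (c :: r3).sum = (b :: r2).sum := by
              omega
            have hne : (a :: r1).sum ≠ (b :: r2).sum := by omega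
            rw [if_pos h2m, hmx, PySem.List.index?_cons_of_ne _ hne,
              PySem.List.index?_cons_self]
            simp only [Option.map_some]
            have hpop : (b :: r2).reverse.dropLast = r2.reverse := by
              rw [List.reverse_cons, List.dropLast_concat]
            have hlast : (b :: r2).reverse.getLastD 0 = b := by
              rw [List.reverse_cons, List.getLastD_concat]
            have hb : (b :: r2).sum - b = r2.sum := by omega
            simp only [List.set_cons_succ, List.set_cons_zero, List.getD_cons_succ,
              List.getD_cons_zero, hpop, hlast, hb]
            exact ih (a :: r1) r2 (c :: r3) (by simp; omega)
          · have hmx : max (max (a :: r1).sum (b :: r2).sum) (c :: r3).sum = (c :: r3).sum := by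
              omega
            have hne1 : (a :: r1).sum ≠ (c :: r3).sum := by omega
            have hne2 : (b :: r2).sum ≠ (c :: r3).sum := by omega
            rw [if_neg h2m, hmx, PySem.List.index?_cons_of_ne _ hne1,
              PySem.List.index?_cons_of_ne _ hne2, PySem.List.index?_cons_self]
            simp only [Option.map_some]
            have hpop : (c :: r3).reverse.dropLast = r3.reverse := by
              rw [List.reverse_cons, List.dropLast_concat]
            have hlast : (c :: r3).reverse.getLastD 0 = c := by
              rw [List.reverse_cons, List.getLastD_concat]
            have hc : (c :: r3).sum - c = r3.sum := by omega
            simp only [List.set_cons_succ, List.set_cons_zero, List.getD_cons_succ,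
              List.getD_cons_zero, hpop, hlast, hc]
            exact ih (a :: r1) (b :: r2) r3 (by simp; omega)

-- ===== VERDICT (by name: the statement is the Claim_ definition above) =====
theorem equalStacks_spec : Claim_equal_equalStacks := by
  intro h1 h2 h3 _
  show equalStacks h1 h2 h3 = equalStacks_alt h1 h2 h3
  rw [equalStacks, equalStacks_alt]
  simp only [List.sum_reverse]
  rw [bLoop_eq _ h1 h2 h3 (by omega)]
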